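-- pv_equiv track=rewrite | github.com/AlgorithmWithFriend/Day1 | LEVEL2/Day09/ExpectedDraw.py | solution
-- ===== SOURCE A (Python) =====
-- def solution(n,a,b):
--     answer = 0
--     while a!=b:
--         if a%2==0:
--             a//=2
--         else:
--             a//=2
--             a+=1
--         if b%2==0:
--             b//=2
--         else:
--             b//=2
--             b+=1
--         answer+=1
--     return answer
-- ===== SOURCE B (Python) =====
-- def solution(n, a, b):
--     # Both branches of A compute the ceiling half: x -> ceil(x/2), i.e. x-1 -> (x-1)>>1.
--     # a and b meet after exactly ((a-1) ^ (b-1)).bit_length() halvings.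
--     return ((a - 1) ^ (b - 1)).bit_length()
-- ===== Notes on version B (the rewrite author's own statement) =====
-- stated objective: simpler
-- what changed: Replaced the simultaneous ceiling-halving loop by the closed form ((a-1) ^ (b-1)).bit_length(), with no loop at all; Pre_ excludes the opposite-sign inputs (one of a,b >= 1, the other <= 0, a != b) on which A loops forever.
import Mathlib
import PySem

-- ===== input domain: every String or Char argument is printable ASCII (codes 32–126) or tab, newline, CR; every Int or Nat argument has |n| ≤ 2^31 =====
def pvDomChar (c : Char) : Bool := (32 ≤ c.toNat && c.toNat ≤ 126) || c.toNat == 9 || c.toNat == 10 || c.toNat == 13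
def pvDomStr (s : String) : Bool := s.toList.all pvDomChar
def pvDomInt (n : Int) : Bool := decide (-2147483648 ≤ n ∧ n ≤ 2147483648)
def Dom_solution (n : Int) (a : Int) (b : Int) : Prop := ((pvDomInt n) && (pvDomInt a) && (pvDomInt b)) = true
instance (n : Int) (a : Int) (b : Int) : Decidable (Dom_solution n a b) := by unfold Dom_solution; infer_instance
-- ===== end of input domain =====

-- B replaces A's simultaneous ceiling-halving loop by the closed form
-- ((a-1) ^ (b-1)).bit_length() (objective: simpler, no loop).

-- ===== PORT A =====
-- one body of A's while-loop applied to one variable (both if-branches compute this)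
def pyStep (x : Int) : Int :=
  if PySem.Int.mod x 2 = 0 then PySem.Int.floordiv x 2
  else PySem.Int.floordiv x 2 + 1

-- A's while-loop; fuel is only a totality guard (the loop halves the operands,
-- so (a-1).natAbs + (b-1).natAbs + 1 rounds always suffice where it terminates)
def solutionLoop : Nat → Int → Int → Int → Int
  | 0, _, _, answer => answer
  | fuel + 1, a, b, answer =>
    if a = b then answer
    else solutionLoop fuel (pyStep a) (pyStep b) (answer + 1)

def solution (n : Int) (a : Int) (b : Int) : Int :=
  solutionLoop ((a - 1).natAbs + (b - 1).natAbs + 1) a b 0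

-- ===== PORT B =====
def solution_alt (n : Int) (a : Int) (b : Int) : Int :=
  (PySem.Int.bitLength (PySem.Int.bxor (a - 1) (b - 1)) : Int)

-- ===== PRECONDITION & SPEC =====
-- Pre_ excludes exactly the inputs on which A loops forever (never returns):
-- one of a, b ≥ 1 and the other ≤ 0 with a ≠ b.
def Pre_solution (n : Int) (a : Int) (b : Int) : Prop :=
  (1 ≤ a ∧ 1 ≤ b) ∨ (a ≤ 0 ∧ b ≤ 0)
instance (n : Int) (a : Int) (b : Int) : Decidable (Pre_solution n a b) := by
  unfold Pre_solution; infer_instance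

def pvWitness_solution : Int × Int × Int := (16, 3, 7)

def Spec_solution (n : Int) (a : Int) (b : Int) (out : Int) : Prop := out = solution_alt n a b
instance (n : Int) (a : Int) (b : Int) (out : Int) : Decidable (Spec_solution n a b out) := by
  unfold Spec_solution; infer_instance

-- ===== CLAIM (what is proved, stated in full; the proofs are below) =====
def Claim_equal_solution : Prop := ∀ (n : Int) (a : Int) (b : Int), Dom_solution n a b → Pre_solution n a b → Spec_solution n a b (solution n a b)

-- ===== LEMMAS AND PROOFS =====

-- bit length of a natural number, via PySem's Python-exact bitLength
def BL (m : Nat) : Nat := PySem.Int.bitLength (m : Int)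

theorem BL_zero : BL 0 = 0 := by decide

theorem BL_succ (m : Nat) (h : 0 < m) : BL m = BL (m / 2) + 1 := by
  unfold BL
  exact PySem.Int.bitLength_natCast h

theorem BL_le_of_lt_two_pow : ∀ (k m : Nat), m < 2 ^ k → BL m ≤ k := by
  intro k
  induction k with
  | zero => intro m h; interval_cases m; simp [BL_zero]
  | succ k ih =>
    intro m h
    rcases Nat.eq_zero_or_pos m with rfl | hm
    · simp [BL_zero]
    · rw [BL_succ m hm]
      have : m / 2 < 2 ^ k := by
        rw [pow_succ] at h; omega
      exact Nat.succ_le_succ (ih _ this)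

theorem xor_div_two (u v : Nat) : (u ^^^ v) / 2 = u / 2 ^^^ v / 2 := by
  apply Nat.eq_of_testBit_eq
  intro i
  simp [Nat.testBit_div_two, Nat.testBit_xor]

theorem step_pos (u : Nat) : pyStep ((u : Int) + 1) = ((u / 2 : Nat) : Int) + 1 := by
  unfold pyStep
  rw [PySem.Int.mod_eq_emod_of_pos (by omega), PySem.Int.floordiv_eq_ediv_of_pos (by omega)]
  split_ifs with h <;> omega

theorem step_neg (u : Nat) : pyStep (-(u : Int)) = -((u / 2 : Nat) : Int) := by
  unfold pyStep
  rw [PySem.Int.mod_eq_emod_of_pos (by omega), PySem.Int.floordiv_eq_ediv_of_pos (by omega)]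
  split_ifs with h <;> omega

theorem loop_pos : ∀ (fuel u v : Nat) (ans : Int), BL (u ^^^ v) ≤ fuel →
    solutionLoop fuel ((u : Int) + 1) ((v : Int) + 1) ans = ans + BL (u ^^^ v) := by
  intro fuel
  induction fuel with
  | zero =>
    intro u v ans h
    have h0 : BL (u ^^^ v) = 0 := by omega
    simp [solutionLoop, h0]
  | succ fuel ih =>
    intro u v ans h
    by_cases huv : u = v
    · subst huv
      simp [solutionLoop, BL_zero]
    · have hne : ((u : Int) + 1) ≠ ((v : Int) + 1) := by
        intro hc; apply huv; omega
      have hx : 0 < u ^^^ v := Nat.pos_of_ne_zero (by simpa [Nat.xor_eq_zero_iff] using huv)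
      rw [solutionLoop, if_neg hne, step_pos, step_pos,
        ih (u / 2) (v / 2) (ans + 1) (by rw [← xor_div_two]; rw [BL_succ _ hx] at h; omega)]
      rw [← xor_div_two, BL_succ _ hx]
      push_cast
      ring

theorem loop_neg : ∀ (fuel u v : Nat) (ans : Int), BL (u ^^^ v) ≤ fuel →
    solutionLoop fuel (-(u : Int)) (-(v : Int)) ans = ans + BL (u ^^^ v) := by
  intro fuel
  induction fuel with
  | zero =>
    intro u v ans h
    have h0 : BL (u ^^^ v) = 0 := by omega
    simp [solutionLoop, h0]
  | succ fuel ih =>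
    intro u v ans h
    by_cases huv : u = v
    · subst huv
      simp [solutionLoop, BL_zero]
    · have hne : (-(u : Int)) ≠ (-(v : Int)) := by
        intro hc; apply huv; omega
      have hx : 0 < u ^^^ v := Nat.pos_of_ne_zero (by simpa [Nat.xor_eq_zero_iff] using huv)
      rw [solutionLoop, if_neg hne, step_neg, step_neg,
        ih (u / 2) (v / 2) (ans + 1) (by rw [← xor_div_two]; rw [BL_succ _ hx] at h; omega)]
      rw [← xor_div_two, BL_succ _ hx]
      push_cast
      ring

theorem BL_fuel (u v w : Nat) (hu : u ≤ w) (hv : v ≤ w) : BL (u ^^^ v) ≤ w + 1 := by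
  apply BL_le_of_lt_two_pow
  have hu2 : u < 2 ^ (w + 1) := lt_of_le_of_lt hu (lt_of_lt_of_le (Nat.lt_two_pow_self) (Nat.pow_le_pow_right (by omega) (by omega)))
  have hv2 : v < 2 ^ (w + 1) := lt_of_le_of_lt hv (lt_of_lt_of_le (Nat.lt_two_pow_self) (Nat.pow_le_pow_right (by omega) (by omega)))
  exact Nat.xor_lt_two_pow hu2 hv2

-- ===== VERDICT (by name: the statement is the Claim_ definition above) =====
theorem bxor_neg_neg (u v : Nat) :
    PySem.Int.bxor (-(u : Int) - 1) (-(v : Int) - 1) = ((u ^^^ v : Nat) : Int) := by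
  simp [PySem.Int.bxor]
  split_ifs <;> first | rfl | omega

theorem natAbs_neg_sub_one (u : Nat) : (-(u : Int) - 1).natAbs = u + 1 := by omega

theorem solution_spec : Claim_equal_solution := by
  intro n a b _ hpre
  unfold Spec_solution solution solution_alt
  rcases hpre with ⟨ha, hb⟩ | ⟨ha, hb⟩
  · -- both ≥ 1: write a = u+1, b = v+1 with u, v : Nat
    obtain ⟨u, hu⟩ : ∃ u : Nat, a - 1 = (u : Int) := ⟨(a - 1).toNat, by omega⟩
    obtain ⟨v, hv⟩ : ∃ v : Nat, b - 1 = (v : Int) := ⟨(b - 1).toNat, by omega⟩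
    have hau : a = (u : Int) + 1 := by omega
    have hbv : b = (v : Int) + 1 := by omega
    rw [hu, hv, hau, hbv, PySem.Int.bxor_natCast, Int.natAbs_natCast, Int.natAbs_natCast,
      loop_pos (u + v + 1) u v 0 (BL_fuel u v (u + v) (by omega) (by omega))]
    simp [BL]
  · -- both ≤ 0: write a = -u, b = -v with u, v : Nat
    obtain ⟨u, hu⟩ : ∃ u : Nat, a = -(u : Int) := ⟨(-a).toNat, by omega⟩
    obtain ⟨v, hv⟩ : ∃ v : Nat, b = -(v : Int) := ⟨(-b).toNat, by omega⟩
    rw [hu, hv, bxor_neg_neg, natAbs_neg_sub_one, natAbs_neg_sub_one]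
    have hle : BL (u ^^^ v) ≤ u + 1 + (v + 1) + 1 := by
      have := BL_fuel u v (u + v) (by omega) (by omega); omega
    rw [loop_neg (u + 1 + (v + 1) + 1) u v 0 hle]
    simp [BL]
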